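-- pv_equiv track=rewrite | github.com/Jane620/python3 | Awesome_Python/Algorithms and Design Patterns/Algorithms/5_max_one_index.py | max_ones_index
-- ===== SOURCE A (Python) =====
-- def max_ones_index(arr):
--
--     n = len(arr)
--     max_count = 0
--     max_index = 0
--     prev_zero = -1
--     prev_prev_zero = -1
--
--     for curr in range(n):
--
--         # If current element is 0,
--         # then calculate the difference
--         # between curr and prev_prev_zero
--         if arr[curr] == 0:
--             # 第一道保障，确保当只有计算出来的比上一次的最长还长才进行下去，因此只要记录一次上一次和上上次即可
--             if curr - prev_prev_zero > max_count:
--                 max_count = curr - prev_prev_zero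
--                 max_index = prev_zero
--
--             prev_prev_zero = prev_zero
--             prev_zero = curr
--     # 意图不明？ 整长 - 上上次的索引位置 > 最大长度
--     if n - prev_prev_zero > max_count:
--         #  则最长索引去上次
--         max_index = prev_zero
--
--     return max_index
-- ===== SOURCE B (Python) =====
-- def max_ones_index(arr):
--     n = len(arr)
--     zeros = [i for i in range(n) if arr[i] == 0]
--     if not zeros:
--         return -1
--     best_count = 0
--     best = -1
--     for p, z, nx in zip([-1] + zeros[:-1], zeros, zeros[1:] + [n]):
--         if nx - p > best_count:
--             best_count = nx - p
--             best = z
--     return best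
-- ===== Notes on version B (the rewrite author's own statement) =====
-- stated objective: simpler
-- what changed: B first materialises the list of zero positions and scores each zero by next_zero - prev_zero (with -1/n boundary sentinels) in one uniform pass, replacing A's two rolling sentinels with an after-loop patch-up step.
import Mathlib
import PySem

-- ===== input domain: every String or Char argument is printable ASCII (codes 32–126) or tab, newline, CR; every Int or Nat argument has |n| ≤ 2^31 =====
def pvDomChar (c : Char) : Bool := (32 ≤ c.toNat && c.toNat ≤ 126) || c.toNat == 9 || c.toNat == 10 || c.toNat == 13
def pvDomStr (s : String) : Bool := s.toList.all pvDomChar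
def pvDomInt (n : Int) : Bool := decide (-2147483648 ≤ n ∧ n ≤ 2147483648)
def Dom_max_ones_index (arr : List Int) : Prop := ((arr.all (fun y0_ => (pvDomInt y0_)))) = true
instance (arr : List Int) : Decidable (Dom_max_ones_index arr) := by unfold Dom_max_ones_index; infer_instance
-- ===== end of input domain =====

-- B scores each zero index directly from its neighbouring zeros (sentinels -1 and n) in one uniform
-- pass over the list of zero positions, instead of A's rolling prev/prev-prev sentinels plus an
-- after-loop patch; objective: simpler (same O(n) cost).

-- ===== PORT A =====
-- loop state (max_count, max_index, prev_zero, prev_prev_zero)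
def pvStepA (arr : List Int) (s : Int × Int × Int × Int) (curr : Int) : Int × Int × Int × Int :=
  match s with
  | (mc, mi, pz, ppz) =>
    if PySem.List.pyGet? arr curr == some (0 : Int) then
      if curr - ppz > mc then (curr - ppz, pz, curr, pz) else (mc, mi, curr, pz)
    else (mc, mi, pz, ppz)

def max_ones_index (arr : List Int) : Int :=
  let n : Int := arr.length
  let s := (PySem.List.pyRange 0 n 1).foldl (pvStepA arr) (0, 0, -1, -1)
  if n - s.2.2.2 > s.1 then s.2.2.1 else s.2.1

-- ===== PORT B =====
-- loop state (best_count, best); t = (p, z, nx)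
def pvStepB (s : Int × Int) (t : Int × Int × Int) : Int × Int :=
  match s, t with
  | (bc, bi), (p, z, nx) => if nx - p > bc then (nx - p, z) else (bc, bi)

def max_ones_index_alt (arr : List Int) : Int :=
  let n : Int := arr.length
  let zeros := (PySem.List.pyRange 0 n 1).filter (fun i => PySem.List.pyGet? arr i == some (0 : Int))
  if zeros = [] then -1
  else
    ((List.zip ((-1) :: zeros.dropLast) (List.zip zeros (zeros.tail ++ [n]))).foldl
      pvStepB (0, -1)).2

-- ===== PRECONDITION & SPEC =====
def Spec_max_ones_index (arr : List Int) (out : Int) : Prop := out = max_ones_index_alt arr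
instance (arr : List Int) (out : Int) : Decidable (Spec_max_ones_index arr out) := by unfold Spec_max_ones_index; infer_instance

-- ===== CLAIM (what is proved, stated in full; the proofs are below) =====
def Claim_equal_max_ones_index : Prop := ∀ (arr : List Int), Dom_max_ones_index arr → Spec_max_ones_index arr (max_ones_index arr)

-- ===== LEMMAS AND PROOFS =====

-- A's loop step restricted to the zero positions (the non-zero branch is the identity).
def pvStepZ (s : Int × Int × Int × Int) (curr : Int) : Int × Int × Int × Int :=
  match s with
  | (mc, mi, pz, ppz) =>
    if curr - ppz > mc then (curr - ppz, pz, curr, pz) else (mc, mi, curr, pz)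

-- A's after-loop patch.
def pvAfin (n : Int) (s : Int × Int × Int × Int) : Int :=
  if n - s.2.2.2 > s.1 then s.2.2.1 else s.2.1

-- B's (prev, zero, next) triple list, with boundary sentinels p and n.
def pvTriB : Int → List Int → Int → List (Int × Int × Int)
  | _, [], _ => []
  | p, [z], n => [(p, z, n)]
  | p, z :: w :: rest, n => (p, z, w) :: pvTriB z (w :: rest) n

theorem pvZip_eq_triB : ∀ (l : List Int) (p n : Int),
    List.zip (p :: l.dropLast) (List.zip l (l.tail ++ [n])) = pvTriB p l n := by
  intro l
  induction l with
  | nil => intro p n; simp [pvTriB]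
  | cons z rest ih =>
    intro p n
    cases rest with
    | nil => simp [pvTriB]
    | cons w rest' =>
      simpa [pvTriB] using ih z n

theorem pvFoldA_eq_foldZ (arr : List Int) (l : List Int) (init : Int × Int × Int × Int) :
    l.foldl (pvStepA arr) init
      = (l.filter (fun i => PySem.List.pyGet? arr i == some (0 : Int))).foldl pvStepZ init := by
  rw [List.foldl_filter]
  have h : pvStepA arr = fun s c =>
      if (PySem.List.pyGet? arr c == some (0 : Int)) = true then pvStepZ s c else s := by
    funext s c
    obtain ⟨mc, mi, pz, ppz⟩ := s
    simp only [pvStepA, pvStepZ]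
  rw [h]

-- The heart: once A has seen at least one zero (prev_zero = z, prev_prev_zero = pp) and the two
-- running (count, index) states agree, A's remaining loop plus its after-loop patch computes
-- exactly B's fold over the remaining (prev, zero, next) triples.
theorem pvMain (n : Int) : ∀ (l : List Int) (z pp mc mi : Int),
    pvAfin n (l.foldl pvStepZ (mc, mi, z, pp))
      = ((pvTriB pp (z :: l) n).foldl pvStepB (mc, mi)).2 := by
  intro l
  induction l with
  | nil =>
    intro z pp mc mi
    simp only [pvTriB, List.foldl_cons, List.foldl_nil, pvStepB, pvAfin]
    split <;> rfl
  | cons w rest ih =>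
    intro z pp mc mi
    simp only [pvTriB, List.foldl_cons, pvStepZ, pvStepB]
    split
    · exact ih w z _ _
    · exact ih w z _ _

-- ===== VERDICT (by name: the statement is the Claim_ definition above) =====
theorem max_ones_index_spec : Claim_equal_max_ones_index := by
  intro arr _
  show max_ones_index arr = max_ones_index_alt arr
  have hb : ∀ x ∈ (PySem.List.pyRange 0 (arr.length : Int) 1).filter
      (fun i => PySem.List.pyGet? arr i == some (0 : Int)), 0 ≤ x ∧ x < (arr.length : Int) := by
    intro x hx
    have hm := List.mem_of_mem_filter hx
    rw [PySem.List.mem_pyRange_one] at hm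
    exact hm
  have hpw : ((PySem.List.pyRange 0 (arr.length : Int) 1).filter
      (fun i => PySem.List.pyGet? arr i == some (0 : Int))).Pairwise (· < ·) :=
    (PySem.List.pairwise_lt_pyRange_one (a := 0) (b := (arr.length : Int))).filter _
  simp only [max_ones_index, max_ones_index_alt]
  rw [pvFoldA_eq_foldZ, pvZip_eq_triB]
  rcases hc : (PySem.List.pyRange 0 (arr.length : Int) 1).filter
      (fun i => PySem.List.pyGet? arr i == some (0 : Int)) with _ | ⟨z, rest⟩
  · simp only [List.foldl_nil]
    rw [if_pos trivial]
    split_ifs with h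
    · rfl
    · exfalso; omega
  · rw [hc] at hb hpw
    rw [if_neg (List.cons_ne_nil z rest)]
    obtain ⟨hz0, hzn⟩ := hb z List.mem_cons_self
    have e1 : pvStepZ (0, 0, -1, -1) z = (z - -1, -1, z, -1) := by
      simp only [pvStepZ]; rw [if_pos (by omega)]
    cases rest with
    | nil =>
      rw [List.foldl_cons, List.foldl_nil, e1]
      simp only [pvTriB, List.foldl_cons, List.foldl_nil, pvStepB]
      rw [if_pos (by omega), if_pos (by omega)]
    | cons w rest' =>
      obtain ⟨hw0, hwn⟩ := hb w (by simp)
      have hzw : z < w := List.rel_of_pairwise_cons hpw (by simp)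
      have e2 : pvStepZ (z - -1, -1, z, -1) w = (w - -1, z, w, z) := by
        simp only [pvStepZ]; rw [if_pos (by omega)]
      have e3 : pvStepB (0, -1) (-1, z, w) = (w - -1, z) := by
        simp only [pvStepB]; rw [if_pos (by omega)]
      rw [List.foldl_cons, List.foldl_cons, e1, e2]
      rw [show pvTriB (-1) (z :: w :: rest') (arr.length : Int)
            = (-1, z, w) :: pvTriB z (w :: rest') (arr.length : Int) from rfl]
      rw [List.foldl_cons, e3]
      exact pvMain _ rest' w z _ _
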